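-- pv_equiv track=rewrite | github.com/Capilot989/practical-work-15 | ex_6.py | degree5
-- ===== SOURCE A (Python) =====
-- def degree5(n: int) -> int:
--     """
--         Determine the exponent of 5 for a natural number n using recursion.
--
--         This function checks if the given natural number n is a power of 5.
--         If n is a power of 5, it returns the exponent (k such that 5^k = n).
--         If n is not a power of 5, it returns -1.
--
--         Args:
--             n (int): A natural number (positive integer) to check
--
--         Returns:
--             int: The exponent k if n = 5^k, otherwise -1
--         """
--     if n == 1:
--         return 0
--     if n % 5 != 0:
--         return -1
--     if n == 5:
--         return 1
--     exponent = degree5(n // 5)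
--     if exponent != -1:
--         return exponent + 1
--     return -1
-- ===== SOURCE B (Python) =====
-- def degree5(n: int) -> int:
--     if n == 1:
--         return 0
--     k = 0
--     while n % 5 == 0:
--         n //= 5
--         k += 1
--         if n == 1:
--             return k
--     return -1
-- ===== Notes on version B (the rewrite author's own statement) =====
-- stated objective: simpler
-- what changed: Replaces the naive recursion (which peels one factor of 5 per call and rebuilds the exponent on the way back) by a single iterative while-loop maintaining an exponent accumulator, with no recursion and no post-recursion fix-up branches.
-- outside the precondition, e.g. on degree5(0): A raises RecursionError, B does not finish within the time limit
import Mathlib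
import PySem

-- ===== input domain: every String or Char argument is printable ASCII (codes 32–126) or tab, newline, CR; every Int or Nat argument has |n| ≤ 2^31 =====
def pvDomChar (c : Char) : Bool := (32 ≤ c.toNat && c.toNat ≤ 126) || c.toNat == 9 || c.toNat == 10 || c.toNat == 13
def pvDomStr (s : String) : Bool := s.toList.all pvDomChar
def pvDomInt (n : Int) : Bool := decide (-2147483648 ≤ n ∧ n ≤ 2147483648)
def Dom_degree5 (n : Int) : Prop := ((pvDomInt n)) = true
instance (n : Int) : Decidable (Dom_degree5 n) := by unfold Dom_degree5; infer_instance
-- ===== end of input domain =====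

-- B replaces A's recursion by one iterative loop with an exponent accumulator (objective: simpler).
-- On n = 0 the Python A raises RecursionError and the Python B loops forever; Pre_ excludes it.

-- ===== PORT A =====
-- A's recursion diverges on n = 0; fuel n.natAbs + 1 suffices for every other input
-- (each recursive call divides |n| by 5), so inside Pre_ the fuel-0 branch is never reached.
def degree5Aux : Nat → Int → Int
  | 0, _ => -1
  | fuel + 1, n =>
    if n = 1 then 0
    else if PySem.Int.mod n 5 ≠ 0 then -1
    else if n = 5 then 1
    else
      let exponent := degree5Aux fuel (PySem.Int.floordiv n 5)
      if exponent ≠ -1 then exponent + 1 else -1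

def degree5 (n : Int) : Int := degree5Aux (n.natAbs + 1) n

-- ===== PORT B =====
-- the while-loop of Source B: state (n, k); same fuel argument as above
def degree5AltLoop : Nat → Int → Int → Int
  | 0, _, _ => -1
  | fuel + 1, n, k =>
    if PySem.Int.mod n 5 = 0 then
      let n' := PySem.Int.floordiv n 5
      let k' := k + 1
      if n' = 1 then k' else degree5AltLoop fuel n' k'
    else -1

def degree5_alt (n : Int) : Int :=
  if n = 1 then 0 else degree5AltLoop (n.natAbs + 1) n 0

-- ===== PRECONDITION & SPEC =====
-- Pre_ excludes n = 0, on which Python A raises RecursionError (no value is returned).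
def Pre_degree5 (n : Int) : Prop := n ≠ 0
instance (n : Int) : Decidable (Pre_degree5 n) := by unfold Pre_degree5; infer_instance
def pvWitness_degree5 : Int := (125)

def Spec_degree5 (n : Int) (out : Int) : Prop := out = degree5_alt n
instance (n : Int) (out : Int) : Decidable (Spec_degree5 n out) := by unfold Spec_degree5; infer_instance

-- ===== CLAIM (what is proved, stated in full; the proofs are below) =====
def Claim_equal_degree5 : Prop := ∀ (n : Int), Dom_degree5 n → Pre_degree5 n → Spec_degree5 n (degree5 n)

-- ===== LEMMAS AND PROOFS =====

theorem mod5_facts {n : Int} (h : PySem.Int.mod n 5 = 0) (hn : n ≠ 0) :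
    5 * PySem.Int.floordiv n 5 = n ∧ (PySem.Int.floordiv n 5).natAbs < n.natAbs ∧
      PySem.Int.floordiv n 5 ≠ 0 := by
  have hdm := PySem.Int.floordiv_mul_add_mod n 5
  rw [h, add_zero] at hdm
  have heq : 5 * PySem.Int.floordiv n 5 = n := by linarith
  have hq0 : PySem.Int.floordiv n 5 ≠ 0 := by intro h0; rw [h0] at heq; omega
  have habs : n.natAbs = 5 * (PySem.Int.floordiv n 5).natAbs := by
    rw [← heq]; simp [Int.natAbs_mul]
  exact ⟨heq, by omega, hq0⟩

theorem degree5Aux_ge {fuel : Nat} {n : Int} :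
    degree5Aux fuel n = -1 ∨ 0 ≤ degree5Aux fuel n := by
  induction fuel generalizing n with
  | zero => simp [degree5Aux]
  | succ fuel ih =>
    simp only [degree5Aux]
    split_ifs with h1 h2 h3 h4
    · omega
    · omega
    · omega
    · rcases ih (n := PySem.Int.floordiv n 5) with h | h <;> omega
    · omega

theorem loop_eq_aux {fuel : Nat} : ∀ {n : Int} (k : Int), n.natAbs < fuel → n ≠ 0 → n ≠ 1 →
    degree5AltLoop fuel n k =
      (if degree5Aux fuel n = -1 then -1 else degree5Aux fuel n + k) := by
  induction fuel with
  | zero => intro n k h; omega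
  | succ fuel ih =>
    intro n k hf hn0 hn1
    simp only [degree5AltLoop, degree5Aux]
    by_cases hm : PySem.Int.mod n 5 = 0
    · obtain ⟨heq, hlt, hq0⟩ := mod5_facts hm hn0
      rw [if_pos hm, if_neg hn1, if_neg (show ¬PySem.Int.mod n 5 ≠ 0 from not_not_intro hm)]
      by_cases h5 : n = 5
      · have h1 : PySem.Int.floordiv n 5 = 1 := by subst h5; decide
        rw [if_pos h1, if_pos h5]
        omega
      · have hq1 : PySem.Int.floordiv n 5 ≠ 1 := by
          intro h; rw [h] at heq; omega
        rw [if_neg hq1, if_neg h5,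
          ih (k + 1) (by omega) hq0 hq1]
        rcases degree5Aux_ge (fuel := fuel) (n := PySem.Int.floordiv n 5) with he | he
        · rw [if_pos he, he]
          norm_num
        · have hne : degree5Aux fuel (PySem.Int.floordiv n 5) ≠ -1 := by omega
          rw [if_neg hne, if_pos hne, if_neg (by omega : ¬degree5Aux fuel (PySem.Int.floordiv n 5) + 1 = -1)]
          omega
    · rw [if_neg hm, if_neg hn1, if_pos hm, if_pos rfl]

-- ===== VERDICT (by name: the statement is the Claim_ definition above) =====
theorem degree5_spec : Claim_equal_degree5 := by
  intro n _ hn0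
  unfold Spec_degree5 degree5 degree5_alt
  by_cases hn1 : n = 1
  · subst hn1; decide
  · rw [loop_eq_aux 0 (by omega) hn0 hn1]
    rcases degree5Aux_ge (fuel := n.natAbs + 1) (n := n) with h | h <;> simp [h] <;> omega
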